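-- pv_equiv track=rewrite | github.com/jhj9109/TIL | Baekjun/17281_야구/test.py | getGG
-- ===== SOURCE A (Python) =====
-- def getGG(d):
--     cnt = 0
--     ret = []
--     for rows in d:
--         temp = 0
--         temp_res = 0
--         for _ in range(3):
--             for r in rows:
--                 if r:
--                     temp += 1
--                 else:
--                     temp_res = temp if temp > temp_res else temp_res
--         cnt += temp_res
--         ret.append(cnt)
--     ret = ret[::-1]
--     return ret
-- ===== SOURCE B (Python) =====
-- def getGG(d):
--     cnt = 0
--     ret = []
--     for rows in d:
--         t = 0
--         p = 0
--         seen = False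
--         for r in rows:
--             if r:
--                 t += 1
--             else:
--                 p = t
--                 seen = True
--         cnt += 2 * t + p if seen else 0
--         ret.append(cnt)
--     ret.reverse()
--     return ret
-- ===== Notes on version B (the rewrite author's own statement) =====
-- stated objective: faster
-- what changed: Replaces A's three repeated scans of each row (tracking a running max at every falsy element) with a single pass per row that keeps the truthy count t and the truthy prefix p before the last falsy element, then uses the closed form 2*t+p.
import Mathlib
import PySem

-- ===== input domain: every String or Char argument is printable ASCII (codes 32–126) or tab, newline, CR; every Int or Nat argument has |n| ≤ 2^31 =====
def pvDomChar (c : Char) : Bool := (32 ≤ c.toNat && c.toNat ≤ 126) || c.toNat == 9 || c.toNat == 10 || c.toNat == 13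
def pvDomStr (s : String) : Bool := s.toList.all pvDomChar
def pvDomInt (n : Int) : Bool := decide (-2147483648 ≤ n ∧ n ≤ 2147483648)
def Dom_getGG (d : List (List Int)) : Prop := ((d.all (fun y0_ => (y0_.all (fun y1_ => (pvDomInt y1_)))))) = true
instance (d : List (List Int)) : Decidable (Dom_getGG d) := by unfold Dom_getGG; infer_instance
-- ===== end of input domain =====

-- B replaces A's three nested scans of each row with a single pass and the closed form
-- 2*t + p (t = truthy count, p = truthy prefix before the last falsy element); objective: faster.

-- ===== PORT A =====
-- inner-loop body of A: temp += 1 on truthy, else temp_res = max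
def pvStepA (u : Int × Int) (r : Int) : Int × Int :=
  if r ≠ 0 then (u.1 + 1, u.2) else (u.1, if u.1 > u.2 then u.1 else u.2)

def getGG (d : List (List Int)) : List Int :=
  let s := d.foldl (fun (s : Int × List Int) rows =>
      let t := (PySem.List.pyRange 0 3 1).foldl (fun (u : Int × Int) _ => rows.foldl pvStepA u) (0, 0)
      (s.1 + t.2, s.2 ++ [s.1 + t.2])) (0, [])
  (PySem.List.slice? s.2 none none (-1)).getD []   -- ret[::-1]

-- ===== PORT B =====
-- single-pass body of B: (t, p, seen)
def pvStepB (u : Int × Int × Bool) (r : Int) : Int × Int × Bool :=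
  if r ≠ 0 then (u.1 + 1, u.2.1, u.2.2) else (u.1, u.1, true)

def getGG_alt (d : List (List Int)) : List Int :=
  let s := d.foldl (fun (s : Int × List Int) rows =>
      let u := rows.foldl pvStepB (0, 0, false)
      let c := s.1 + (if u.2.2 then 2 * u.1 + u.2.1 else 0)
      (c, s.2 ++ [c])) (0, [])
  s.2.reverse

-- ===== PRECONDITION & SPEC =====
def Spec_getGG (d : List (List Int)) (out : List Int) : Prop := out = getGG_alt d
instance (d : List (List Int)) (out : List Int) : Decidable (Spec_getGG d out) := by unfold Spec_getGG; infer_instance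

-- ===== CLAIM (what is proved, stated in full; the proofs are below) =====
def Claim_equal_getGG : Prop := ∀ (d : List (List Int)), Dom_getGG d → Spec_getGG d (getGG d)

-- ===== LEMMAS AND PROOFS =====

-- B's fold from an arbitrary start, expressed via its fold from (0,0,false)
theorem pvFoldB_shift (rows : List Int) : ∀ (t p : Int) (s : Bool),
    rows.foldl pvStepB (t, p, s) =
      (t + (rows.foldl pvStepB (0, 0, false)).1,
       if (rows.foldl pvStepB (0, 0, false)).2.2 then t + (rows.foldl pvStepB (0, 0, false)).2.1 else p,
       s || (rows.foldl pvStepB (0, 0, false)).2.2) := by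
  induction rows with
  | nil => intro t p s; simp
  | cons r rest ih =>
    intro t p s
    rcases hb : rest.foldl pvStepB (0, 0, false) with ⟨T, P, S⟩
    by_cases hr : r = 0
    · have e : ∀ u : Int × Int × Bool, pvStepB u r = (u.1, u.1, true) := by
        intro u; simp [pvStepB, hr]
      simp only [List.foldl_cons, e]
      rw [ih t t true, ih 0 0 true, hb]
      cases S <;> simp [Prod.ext_iff] <;> try omega
    · have e : ∀ u : Int × Int × Bool, pvStepB u r = (u.1 + 1, u.2.1, u.2.2) := by
        intro u; simp [pvStepB, hr]
      simp only [List.foldl_cons, e, zero_add]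
      rw [ih (t + 1) p s, ih 1 0 false, hb]
      cases S <;> simp [Prod.ext_iff] <;> try omega

theorem pvFoldB_nonneg (rows : List Int) : ∀ (t p : Int) (s : Bool), 0 ≤ t → 0 ≤ p →
    0 ≤ (rows.foldl pvStepB (t, p, s)).1 ∧ 0 ≤ (rows.foldl pvStepB (t, p, s)).2.1 := by
  induction rows with
  | nil => intro t p s ht hp; exact ⟨ht, hp⟩
  | cons r rest ih =>
    intro t p s ht hp
    by_cases hr : r = 0
    · have e : pvStepB (t, p, s) r = (t, t, true) := by simp [pvStepB, hr]
      rw [List.foldl_cons, e]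
      exact ih t t true ht ht
    · have e : pvStepB (t, p, s) r = (t + 1, p, s) := by simp [pvStepB, hr]
      rw [List.foldl_cons, e]
      exact ih (t + 1) p s (by omega) hp

-- A's one pass over a row, expressed via B's single pass
theorem pvFoldA_char (rows : List Int) : ∀ (a b : Int),
    rows.foldl pvStepA (a, b) =
      (a + (rows.foldl pvStepB (0, 0, false)).1,
       if (rows.foldl pvStepB (0, 0, false)).2.2
         then max b (a + (rows.foldl pvStepB (0, 0, false)).2.1) else b) := by
  induction rows with
  | nil => intro a b; simp
  | cons r rest ih =>
    intro a b
    have hnn := pvFoldB_nonneg rest 0 0 false le_rfl le_rfl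
    rcases hb : rest.foldl pvStepB (0, 0, false) with ⟨T, P, S⟩
    rw [hb] at hnn
    simp only [Prod.fst, Prod.snd] at hnn
    by_cases hr : r = 0
    · have eA : pvStepA (a, b) r = (a, if a > b then a else b) := by simp [pvStepA, hr]
      have eB : pvStepB (0, 0, false) r = ((0 : Int), (0 : Int), true) := by simp [pvStepB, hr]
      rw [List.foldl_cons, List.foldl_cons, eA, eB, ih a (if a > b then a else b),
        pvFoldB_shift rest 0 0 true, hb]
      obtain ⟨h1, h2⟩ := hnn
      cases S <;> simp [Prod.ext_iff, max_def] <;> (try split_ifs) <;> try omega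
    · have eA : pvStepA (a, b) r = (a + 1, b) := by simp [pvStepA, hr]
      have eB : pvStepB (0, 0, false) r = ((1 : Int), (0 : Int), false) := by simp [pvStepB, hr]
      rw [List.foldl_cons, List.foldl_cons, eA, eB, ih (a + 1) b,
        pvFoldB_shift rest 1 0 false, hb]
      obtain ⟨h1, h2⟩ := hnn
      cases S <;> simp [Prod.ext_iff, max_def] <;> (try split_ifs) <;> try omega

-- A's triple scan of a row yields exactly B's closed form 2*t + p (or 0 if no falsy element)
theorem pvRow (rows : List Int) :
    ((PySem.List.pyRange 0 3 1).foldl (fun (u : Int × Int) _ => rows.foldl pvStepA u) (0, 0)).2 =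
      (if (rows.foldl pvStepB (0, 0, false)).2.2
        then 2 * (rows.foldl pvStepB (0, 0, false)).1 + (rows.foldl pvStepB (0, 0, false)).2.1 else 0) := by
  have h3 : PySem.List.pyRange 0 3 1 = [0, 1, 2] := by decide
  rw [h3]
  simp only [List.foldl_cons, List.foldl_nil]
  have hnn := pvFoldB_nonneg rows 0 0 false le_rfl le_rfl
  rcases hb : rows.foldl pvStepB (0, 0, false) with ⟨T, P, S⟩
  rw [hb] at hnn
  obtain ⟨h1, h2⟩ := hnn
  rw [pvFoldA_char, hb]
  cases S
  · rw [pvFoldA_char, hb, pvFoldA_char, hb]; simp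
  · rw [pvFoldA_char, hb, pvFoldA_char, hb]
    simp [max_def]
    split_ifs <;> omega

-- ===== VERDICT (by name: the statement is the Claim_ definition above) =====
theorem getGG_spec : Claim_equal_getGG := by
  intro d _
  show getGG d = getGG_alt d
  unfold getGG getGG_alt
  have hstep : (fun (s : Int × List Int) (rows : List Int) =>
      let t := (PySem.List.pyRange 0 3 1).foldl (fun (u : Int × Int) _ => rows.foldl pvStepA u) (0, 0)
      (s.1 + t.2, s.2 ++ [s.1 + t.2])) =
      (fun (s : Int × List Int) (rows : List Int) =>
      let u := rows.foldl pvStepB (0, 0, false)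
      let c := s.1 + (if u.2.2 then 2 * u.1 + u.2.1 else 0)
      (c, s.2 ++ [c])) := by
    funext s rows
    simp only [pvRow rows]
  rw [hstep]
  simp only [PySem.List.slice?_none_none_neg_one, Option.getD_some]
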